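-- pv_equiv track=rewrite | github.com/liquid-releasing/forgeplayer | app/library/channels.py | device_generations_for_set
-- ===== SOURCE A (Python) =====
-- from enum import Enum
--
-- class DeviceGeneration(str, Enum):
--     """Broad categories of haptic devices the user might own.
--
--     A scene is 'ready for' a generation if the folder contains the funscripts
--     that generation needs. Stored as strings for clean JSON serialization.
--     """
--
--     MECHANICAL = "mechanical"
--     """Linear actuators / strokers — OSR2, Keon, Handy, Launch. Uses the main
--     `.funscript` file (and optionally multi-axis `.roll/.pitch/.twist/...`)."""
--
--     SIMPLE_2B = "2b"
--     """Legacy 2-pad simple estim. Uses the main `.funscript` as intensity."""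
--
--     STEREOSTIM = "stereostim"
--     """2-channel estim (alpha + beta). Needs `.alpha.funscript` + `.beta.funscript`."""
--
--     FOC_STIM = "foc_stim"
--     """3-phase FOC-stim (newest). Needs `.alpha` + `.beta` + `.pulse_frequency`
--     at minimum. Full parameter set also includes pulse_rise_time, pulse_width,
--     volume, frequency."""
--
--     MULTI_AXIS = "multi_axis"
--     """Orthogonal to haptic generations — multi-axis motion data (pitch, roll,
--     twist, surge, sway) for SR6-style devices or VR alignment."""
--
-- FOC_STIM_CHANNELS = frozenset({
--     "gamma",
--     "pulse_frequency", "pulse_rise_time", "pulse_width", "pulse_interval_random",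
--     "volume", "frequency",
-- })
--
-- MULTI_AXIS_CHANNELS = frozenset({"roll", "pitch", "twist", "surge", "sway"})
--
-- def device_generations_for_set(channels_present: set[str]) -> set[DeviceGeneration]:
--     """Compute the generations a funscript set fully supports.
--
--     Input: the set of channel names (without the leading `.`) present in a
--     FunscriptSet, including `""` for the main funscript. Channel names may
--     include subchannel modifiers (e.g. 'alpha-prostate', 'volume-stereostim').
--
--     A generation is supported when its *required* channels are all present,
--     counting subchannel-modified variants as providing the same core channel:
--
--     - MECHANICAL / SIMPLE_2B: main `""` is enough.
--     - SIMPLE_2B (explicit): any channel with `-2b` suffix.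
--     - STEREOSTIM: needs both `alpha` and `beta` core (plain or modified), OR
--       explicit `-stereostim`-suffixed channels present.
--     - FOC_STIM: needs `alpha` + `beta` + at least one FOC-stim parameter
--       channel (plain or with `-foc-stim` suffix). Partial FOC-stim is
--       downgraded to plain stereostim. Explicit `-foc-stim` suffix also
--       counts.
--     - MULTI_AXIS: any of the 5 multi-axis channels (plain or modified).
--     """
--     supported: set[DeviceGeneration] = set()
--
--     def _has_core(core: str) -> bool:
--         """True when any channel has this core (plain or subchannel-modified)."""
--         if core in channels_present:
--             return True
--         return any(
--             ch.startswith(f"{core}-") for ch in channels_present if ch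
--         )
--
--     def _has_any_of(cores: frozenset[str]) -> bool:
--         return any(_has_core(c) for c in cores)
--
--     has_main = "" in channels_present
--     has_alpha = _has_core("alpha")
--     has_beta = _has_core("beta")
--     has_foc_param = _has_any_of(FOC_STIM_CHANNELS)
--     has_multi = _has_any_of(MULTI_AXIS_CHANNELS)
--
--     # Explicit generation-suffix signals
--     has_2b_suffix = any(ch.endswith("-2b") for ch in channels_present if ch)
--     has_stereostim_suffix = any(ch.endswith("-stereostim") for ch in channels_present if ch)
--     has_foc_stim_suffix = any(ch.endswith("-foc-stim") for ch in channels_present if ch)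
--
--     if has_main:
--         supported.add(DeviceGeneration.MECHANICAL)
--         supported.add(DeviceGeneration.SIMPLE_2B)
--     if has_2b_suffix:
--         supported.add(DeviceGeneration.SIMPLE_2B)
--     if has_alpha and has_beta:
--         supported.add(DeviceGeneration.STEREOSTIM)
--     if has_stereostim_suffix:
--         supported.add(DeviceGeneration.STEREOSTIM)
--     if (has_alpha and has_beta and has_foc_param) or has_foc_stim_suffix:
--         supported.add(DeviceGeneration.FOC_STIM)
--     if has_multi:
--         supported.add(DeviceGeneration.MULTI_AXIS)
--
--     return supported
-- ===== SOURCE B (Python) =====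
-- from enum import Enum
--
-- class DeviceGeneration(str, Enum):
--     MECHANICAL = "mechanical"
--     SIMPLE_2B = "2b"
--     STEREOSTIM = "stereostim"
--     FOC_STIM = "foc_stim"
--     MULTI_AXIS = "multi_axis"
--
-- FOC_STIM_CHANNELS = frozenset({
--     "gamma",
--     "pulse_frequency", "pulse_rise_time", "pulse_width", "pulse_interval_random",
--     "volume", "frequency",
-- })
--
-- MULTI_AXIS_CHANNELS = frozenset({"roll", "pitch", "twist", "surge", "sway"})
--
-- def device_generations_for_set(channels_present: set) -> set:
--     """One pass: build the core-channel index and the suffix flags together,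
--     then answer every generation question with O(1) set lookups."""
--     cores: set = set()
--     has_2b_suffix = has_stereostim_suffix = has_foc_stim_suffix = False
--     for ch in channels_present:
--         cores.add(ch)
--         i = ch.find("-")
--         cores.add(ch if i < 0 else ch[:i])
--         has_2b_suffix = has_2b_suffix or ch.endswith("-2b")
--         has_stereostim_suffix = has_stereostim_suffix or ch.endswith("-stereostim")
--         has_foc_stim_suffix = has_foc_stim_suffix or ch.endswith("-foc-stim")
--
--     has_main = "" in channels_present
--     has_alpha = "alpha" in cores
--     has_beta = "beta" in cores
--     has_foc_param = not cores.isdisjoint(FOC_STIM_CHANNELS)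
--     has_multi = not cores.isdisjoint(MULTI_AXIS_CHANNELS)
--
--     supported: set = set()
--     if has_main:
--         supported.add(DeviceGeneration.MECHANICAL)
--         supported.add(DeviceGeneration.SIMPLE_2B)
--     if has_2b_suffix:
--         supported.add(DeviceGeneration.SIMPLE_2B)
--     if has_alpha and has_beta:
--         supported.add(DeviceGeneration.STEREOSTIM)
--     if has_stereostim_suffix:
--         supported.add(DeviceGeneration.STEREOSTIM)
--     if (has_alpha and has_beta and has_foc_param) or has_foc_stim_suffix:
--         supported.add(DeviceGeneration.FOC_STIM)
--     if has_multi: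
--         supported.add(DeviceGeneration.MULTI_AXIS)
--     return supported
-- ===== Notes on version B (the rewrite author's own statement) =====
-- stated objective: faster
-- what changed: Replaces the ~14 per-core scans of the channel set (one _has_core/endswith scan per queried core and suffix) with a single pass that builds a core-name index set plus the three suffix flags, after which every generation question is an O(1) set lookup or one isdisjoint test.
import Mathlib
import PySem

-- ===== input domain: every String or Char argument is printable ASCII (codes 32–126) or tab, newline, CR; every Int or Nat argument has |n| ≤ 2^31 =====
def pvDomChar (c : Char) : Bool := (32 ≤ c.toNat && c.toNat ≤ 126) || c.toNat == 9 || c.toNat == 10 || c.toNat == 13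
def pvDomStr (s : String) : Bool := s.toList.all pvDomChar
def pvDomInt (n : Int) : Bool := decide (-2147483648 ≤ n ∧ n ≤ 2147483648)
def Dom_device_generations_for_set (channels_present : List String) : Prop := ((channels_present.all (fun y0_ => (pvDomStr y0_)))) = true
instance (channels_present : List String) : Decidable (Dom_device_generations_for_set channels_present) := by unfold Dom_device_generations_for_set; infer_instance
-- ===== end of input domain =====

-- B replaces A's ~14 separate scans of the channel set with a single pass building a
-- core-name index set and the three suffix flags; the final generation if-chain is unchanged.

-- ===== PORT A =====
def pvFOC : List String :=
  ["gamma", "pulse_frequency", "pulse_rise_time", "pulse_width", "pulse_interval_random",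
   "volume", "frequency"]

def pvMULTI : List String := ["roll", "pitch", "twist", "surge", "sway"]

-- _has_core: 'core in channels_present or any(ch.startswith(core + "-") for ch in channels_present if ch)'
def pvA_has_core (channels_present : List String) (core : String) : Bool :=
  channels_present.contains core ||
    channels_present.any (fun ch => ch != "" && PySem.Str.startswith ch (core ++ "-"))

def pvA_has_any_of (channels_present : List String) (cores : List String) : Bool :=
  cores.any (fun c => pvA_has_core channels_present c)

def device_generations_for_set (channels_present : List String) : List String :=
  let has_main := channels_present.contains ""
  let has_alpha := pvA_has_core channels_present "alpha"
  let has_beta := pvA_has_core channels_present "beta"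
  let has_foc_param := pvA_has_any_of channels_present pvFOC
  let has_multi := pvA_has_any_of channels_present pvMULTI
  let has_2b_suffix := channels_present.any (fun ch => ch != "" && PySem.Str.endswith ch "-2b")
  let has_stereostim_suffix := channels_present.any (fun ch => ch != "" && PySem.Str.endswith ch "-stereostim")
  let has_foc_stim_suffix := channels_present.any (fun ch => ch != "" && PySem.Str.endswith ch "-foc-stim")
  let s0 : PySem.Set String := PySem.Set.empty
  let s1 := if has_main then PySem.Set.add (PySem.Set.add s0 "mechanical") "2b" else s0
  let s2 := if has_2b_suffix then PySem.Set.add s1 "2b" else s1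
  let s3 := if has_alpha && has_beta then PySem.Set.add s2 "stereostim" else s2
  let s4 := if has_stereostim_suffix then PySem.Set.add s3 "stereostim" else s3
  let s5 := if (has_alpha && has_beta && has_foc_param) || has_foc_stim_suffix then PySem.Set.add s4 "foc_stim" else s4
  let s6 := if has_multi then PySem.Set.add s5 "multi_axis" else s5
  s6

-- ===== PORT B =====
-- 'i = ch.find("-"); ch if i < 0 else ch[:i]'
def pvCoreOf (ch : String) : String :=
  let i := PySem.Str.find ch "-"
  if i < 0 then ch else String.ofList (PySem.List.slice ch.toList none (some i))

-- one loop body: extend the core index, update the three suffix flags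
def pvStep (st : (PySem.Set String) × Bool × Bool × Bool) (ch : String) :
    (PySem.Set String) × Bool × Bool × Bool :=
  (PySem.Set.add (PySem.Set.add st.1 ch) (pvCoreOf ch),
   st.2.1 || PySem.Str.endswith ch "-2b",
   st.2.2.1 || PySem.Str.endswith ch "-stereostim",
   st.2.2.2 || PySem.Str.endswith ch "-foc-stim")

def device_generations_for_set_alt (channels_present : List String) : List String :=
  let st := channels_present.foldl pvStep (PySem.Set.empty, false, false, false)
  let cores := st.1
  let has_2b_suffix := st.2.1
  let has_stereostim_suffix := st.2.2.1
  let has_foc_stim_suffix := st.2.2.2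
  let has_main := channels_present.contains ""
  let has_alpha := PySem.Set.contains cores "alpha"
  let has_beta := PySem.Set.contains cores "beta"
  let has_foc_param := !(PySem.Set.isdisjoint cores pvFOC)
  let has_multi := !(PySem.Set.isdisjoint cores pvMULTI)
  let s0 : PySem.Set String := PySem.Set.empty
  let s1 := if has_main then PySem.Set.add (PySem.Set.add s0 "mechanical") "2b" else s0
  let s2 := if has_2b_suffix then PySem.Set.add s1 "2b" else s1
  let s3 := if has_alpha && has_beta then PySem.Set.add s2 "stereostim" else s2
  let s4 := if has_stereostim_suffix then PySem.Set.add s3 "stereostim" else s3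
  let s5 := if (has_alpha && has_beta && has_foc_param) || has_foc_stim_suffix then PySem.Set.add s4 "foc_stim" else s4
  let s6 := if has_multi then PySem.Set.add s5 "multi_axis" else s5
  s6

-- ===== PRECONDITION & SPEC =====
def Spec_device_generations_for_set (channels_present : List String) (out : List String) : Prop := out = device_generations_for_set_alt channels_present
instance (channels_present : List String) (out : List String) : Decidable (Spec_device_generations_for_set channels_present out) := by unfold Spec_device_generations_for_set; infer_instance

-- ===== CLAIM (what is proved, stated in full; the proofs are below) =====
def Claim_equal_device_generations_for_set : Prop := ∀ (channels_present : List String), Dom_device_generations_for_set channels_present → Spec_device_generations_for_set channels_present (device_generations_for_set channels_present)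

-- ===== LEMMAS AND PROOFS =====

-- the core-index fold, in isolation (proof helper)
def pvCoreFold (channels_present : List String) : PySem.Set String :=
  channels_present.foldl (fun s ch => PySem.Set.add (PySem.Set.add s ch) (pvCoreOf ch)) PySem.Set.empty

-- a filtered suffix scan equals the unfiltered one when the suffix is nonempty
theorem pv_any_filter (l : List String) (sfx : String) (h : sfx.toList ≠ []) :
    l.any (fun ch => ch != "" && PySem.Str.endswith ch sfx) =
      l.any (fun ch => PySem.Str.endswith ch sfx) := by
  have hend : PySem.Chars.endswith ([] : List Char) sfx.toList = false := by
    rw [Bool.eq_false_iff]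
    intro ht
    exact h (List.suffix_nil.mp ((PySem.Chars.endswith_iff _ _).1 ht))
  induction l with
  | nil => rfl
  | cons x xs ih =>
    simp only [List.any_cons, ih]
    by_cases hx : x = ""
    · subst hx
      simp [PySem.Str.endswith_eq, hend]
    · have hb : (x != "") = true := by simp [hx]
      simp [hb]

-- the fold computes the core index and the three suffix scans
theorem pv_fold_char (l : List String) (s : PySem.Set String) (b1 b2 b3 : Bool) :
    l.foldl pvStep (s, b1, b2, b3) =
      (l.foldl (fun s ch => PySem.Set.add (PySem.Set.add s ch) (pvCoreOf ch)) s,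
       b1 || l.any (fun ch => PySem.Str.endswith ch "-2b"),
       b2 || l.any (fun ch => PySem.Str.endswith ch "-stereostim"),
       b3 || l.any (fun ch => PySem.Str.endswith ch "-foc-stim")) := by
  induction l generalizing s b1 b2 b3 with
  | nil => simp
  | cons x xs ih =>
    simp only [List.foldl_cons, List.any_cons, pvStep, ih]
    simp [Bool.or_assoc]

theorem pv_mem_coreFold (l : List String) (s : PySem.Set String) (y : String) :
    y ∈ l.foldl (fun s ch => PySem.Set.add (PySem.Set.add s ch) (pvCoreOf ch)) s ↔
      y ∈ s ∨ ∃ ch ∈ l, y = ch ∨ y = pvCoreOf ch := by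
  induction l generalizing s with
  | nil => simp
  | cons x xs ih =>
    simp only [List.foldl_cons, ih, PySem.Set.mem_add, List.mem_cons]
    constructor
    · rintro (((h|h)|h) | ⟨ch, hch, h⟩)
      · exact Or.inl h
      · exact Or.inr ⟨x, Or.inl rfl, Or.inl h⟩
      · exact Or.inr ⟨x, Or.inl rfl, Or.inr h⟩
      · exact Or.inr ⟨ch, Or.inr hch, h⟩
    · rintro (h | ⟨ch, (rfl|hch), h⟩)
      · exact Or.inl (Or.inl (Or.inl h))
      · rcases h with h|h
        · exact Or.inl (Or.inl (Or.inr h))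
        · exact Or.inl (Or.inr h)
      · exact Or.inr ⟨ch, hch, h⟩

-- take up to the first failing position equals takeWhile
theorem pv_take_eq_takeWhile (n : Nat) (l : List Char)
    (h1 : ['-'] <+: l.drop n) (h2 : ∀ j < n, ¬ ['-'] <+: l.drop j) :
    l.take n = l.takeWhile (fun c => c != '-') := by
  induction n generalizing l with
  | zero =>
    rcases h1 with ⟨t, ht⟩
    simp only [List.drop_zero] at ht
    subst ht
    simp
  | succ n ih =>
    cases l with
    | nil => simp at h1
    | cons c cs =>
      have hc : c ≠ '-' := by
        intro hcc
        exact h2 0 (Nat.succ_pos n) ⟨cs, by simp [hcc]⟩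
      simp only [List.take_succ_cons, List.takeWhile_cons]
      rw [if_pos (by simp [hc]), List.cons.injEq]
      refine ⟨rfl, ih cs h1 ?_⟩
      intro j hj
      exact h2 (j+1) (Nat.succ_lt_succ hj)

theorem pv_coreOf_toList (ch : String) :
    (pvCoreOf ch).toList = ch.toList.takeWhile (fun c => c != '-') := by
  have hdash : ("-" : String).toList = ['-'] := by decide
  simp only [pvCoreOf, PySem.Str.find_eq, hdash]
  by_cases hneg : PySem.Chars.find ch.toList ['-'] < 0
  · rw [if_pos hneg]
    have h1 : PySem.Chars.find ch.toList ['-'] = -1 := by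
      have := PySem.Chars.neg_one_le_find ch.toList ['-']
      omega
    have hnx : ¬ ['-'] <:+: ch.toList := (PySem.Chars.find_eq_neg_one_iff ch.toList ['-']).1 h1
    symm
    rw [List.takeWhile_eq_self_iff]
    intro x hx
    simp only [bne_iff_ne, ne_eq]
    rintro rfl
    obtain ⟨u, v, huv⟩ := List.append_of_mem hx
    exact hnx ⟨u, v, by rw [huv]; simp⟩
  · rw [if_neg hneg]
    push Not at hneg
    obtain ⟨hpre, hmin⟩ := PySem.Chars.find_spec hneg
    rw [PySem.List.slice_to _ hneg]
    simp only [String.toList_ofList]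
    exact pv_take_eq_takeWhile _ _ hpre hmin

theorem pv_dropWhile_head {α : Type} (p : α → Bool) (l : List α) (x : α) (d : List α)
    (h : l.dropWhile p = x :: d) : p x = false := by
  induction l with
  | nil => simp at h
  | cons a as ih =>
    rw [List.dropWhile_cons] at h
    by_cases hpa : p a = true
    · rw [if_pos hpa] at h
      exact ih h
    · rw [if_neg hpa] at h
      cases h
      simpa using hpa

-- takeWhile picture of "has this core as its pre-dash prefix or is it"
theorem pv_tw_iff (l cl : List Char) (hc : '-' ∉ cl) :
    l.takeWhile (fun c => c != '-') = cl ↔ l = cl ∨ cl ++ ['-'] <+: l := by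
  have hclself : List.takeWhile (fun c => c != '-') cl = cl := by
    rw [List.takeWhile_eq_self_iff]
    intro x hx
    simp only [bne_iff_ne, ne_eq]
    rintro rfl
    exact hc hx
  constructor
  · intro h
    rcases heq : l.dropWhile (fun c => c != '-') with _ | ⟨x, d⟩
    · left
      conv_lhs => rw [← List.takeWhile_append_dropWhile (p := fun c => c != '-') (l := l)]
      rw [h, heq, List.append_nil]
    · right
      have hx : x = '-' := by
        have := pv_dropWhile_head (fun c => c != '-') l x d heq
        simpa using this
      subst hx
      refine ⟨d, ?_⟩
      conv_rhs => rw [← List.takeWhile_append_dropWhile (p := fun c => c != '-') (l := l)]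
      rw [h, heq]
      simp
  · rintro (rfl | ⟨t, ht⟩)
    · exact hclself
    · rw [← ht, List.append_assoc, List.takeWhile_append]
      rw [if_pos (by rw [hclself])]
      simp

-- the heart: A's _has_core = membership in B's core index, for dash-free cores
theorem pv_has_core_eq (l : List String) (c : String) (hc : '-' ∉ c.toList) :
    pvA_has_core l c = PySem.Set.contains (pvCoreFold l) c := by
  have hempty : (("" : String).toList) = [] := by decide
  rw [Bool.eq_iff_iff]
  unfold pvA_has_core pvCoreFold
  rw [PySem.Set.contains_iff, pv_mem_coreFold]
  simp only [Bool.or_eq_true, List.any_eq_true, List.contains_iff_mem,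
    PySem.Set.empty, List.not_mem_nil, false_or, Bool.and_eq_true, bne_iff_ne, ne_eq,
    PySem.Str.startswith_eq]
  constructor
  · rintro (hmem | ⟨ch, hch, hne, hp⟩)
    · exact ⟨c, hmem, Or.inl rfl⟩
    · refine ⟨ch, hch, Or.inr ?_⟩
      rw [← String.toList_inj, pv_coreOf_toList]
      symm
      rw [pv_tw_iff _ _ hc]
      right
      have := (PySem.Chars.startswith_iff _ _).1 hp
      simpa using this
  · rintro ⟨ch, hch, (rfl | hcore)⟩
    · exact Or.inl hch
    · have htw : ch.toList.takeWhile (fun c => c != '-') = c.toList := by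
        rw [← pv_coreOf_toList, String.toList_inj]
        exact hcore.symm
      rcases (pv_tw_iff _ _ hc).1 htw with heq | hpref
      · left
        rwa [String.toList_inj.1 heq] at hch
      · right
        refine ⟨ch, hch, ?_, ?_⟩
        · intro hchempty
          subst hchempty
          rw [hempty] at hpref
          have := hpref.length_le
          simp at this
        · rw [PySem.Chars.startswith_iff]
          simpa using hpref

theorem pv_has_any_eq (l : List String) (C : List String) (hC : ∀ c ∈ C, '-' ∉ c.toList) :
    pvA_has_any_of l C = !(PySem.Set.isdisjoint (pvCoreFold l) C) := by
  rw [Bool.eq_iff_iff]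
  unfold pvA_has_any_of
  simp only [List.any_eq_true, Bool.not_eq_true', ← Bool.not_eq_true,
    PySem.Set.isdisjoint_iff]
  constructor
  · rintro ⟨c, hcC, hc⟩
    rw [pv_has_core_eq l c (hC c hcC), PySem.Set.contains_iff] at hc
    intro hall
    exact hall c hc hcC
  · intro hnot
    push Not at hnot
    obtain ⟨x, hx1, hx2⟩ := hnot
    exact ⟨x, hx2, by rw [pv_has_core_eq l x (hC x hx2)]
                      exact (PySem.Set.contains_iff _ _).2 hx1⟩

-- ===== VERDICT (by name: the statement is the Claim_ definition above) =====
theorem device_generations_for_set_spec : Claim_equal_device_generations_for_set := by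
  intro channels_present _
  unfold Spec_device_generations_for_set device_generations_for_set device_generations_for_set_alt
  rw [pv_fold_char]
  simp only [Bool.false_or]
  rw [← pvCoreFold,
      ← pv_has_core_eq channels_present "alpha" (by decide),
      ← pv_has_core_eq channels_present "beta" (by decide),
      ← pv_has_any_eq channels_present pvFOC (by decide),
      ← pv_has_any_eq channels_present pvMULTI (by decide),
      pv_any_filter channels_present "-2b" (by decide),
      pv_any_filter channels_present "-stereostim" (by decide),
      pv_any_filter channels_present "-foc-stim" (by decide)]
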